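-- pv_equiv track=rewrite | github.com/Zaidel-bar-Lab/wormcoolkit | Code/Utils/Strings.py | get_amino_acid_in_location_in_alignment
-- ===== SOURCE A (Python) =====
-- def get_amino_acid_in_location_in_alignment(location: int, sequence_alignment):
--     if location > len(sequence_alignment.replace("-", "")):
--         return len(sequence_alignment)
--     index = 0
--     while location > 0:
--         if 'A' <= sequence_alignment[index] <= 'Z':
--             location -= 1
--         index += 1
--     return index
-- ===== SOURCE B (Python) =====
-- def get_amino_acid_in_location_in_alignment(location: int, sequence_alignment):
--     if location > len(sequence_alignment.replace("-", "")):
--         return len(sequence_alignment)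
--     if location <= 0:
--         return 0
--     positions = [i for i, c in enumerate(sequence_alignment) if 'A' <= c <= 'Z']
--     return positions[location - 1] + 1
-- ===== Notes on version B (the rewrite author's own statement) =====
-- stated objective: idiomatic
-- what changed: Replaces the counting while-loop that scans one character at a time with building the table of uppercase-character positions once and directly indexing the (location-1)-th entry; the location<=0 case becomes an explicit early return of 0.
import Mathlib
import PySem

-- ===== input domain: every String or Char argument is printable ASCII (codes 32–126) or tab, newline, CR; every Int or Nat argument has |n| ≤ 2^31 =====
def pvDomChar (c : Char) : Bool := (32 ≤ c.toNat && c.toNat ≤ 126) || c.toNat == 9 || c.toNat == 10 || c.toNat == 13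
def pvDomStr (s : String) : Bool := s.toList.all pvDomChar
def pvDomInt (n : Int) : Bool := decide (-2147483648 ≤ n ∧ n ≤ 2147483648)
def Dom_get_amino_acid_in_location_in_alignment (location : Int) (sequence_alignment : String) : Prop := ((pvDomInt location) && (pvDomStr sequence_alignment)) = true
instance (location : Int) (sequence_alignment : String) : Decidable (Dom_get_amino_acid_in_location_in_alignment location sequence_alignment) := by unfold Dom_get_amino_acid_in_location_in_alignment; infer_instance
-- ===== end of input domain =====

-- B replaces A's counting while-loop with a one-shot table of uppercase positions plus a
-- direct index (idiomatic restructuring, same cost); return values only, no mutation involved.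

-- ===== PORT A =====
-- the while loop: index advances one char per step, location drops on uppercase;
-- on [] with location still positive Python raises IndexError (excluded by Pre_)
def pvLoopA : Int → List Char → Int → Int
  | loc, chars, index =>
    if loc > 0 then
      match chars with
      | [] => index
      | c :: rest =>
        if 'A' ≤ c ∧ c ≤ 'Z' then pvLoopA (loc - 1) rest (index + 1)
        else pvLoopA loc rest (index + 1)
    else index

def get_amino_acid_in_location_in_alignment (location : Int) (sequence_alignment : String) : Int :=
  if location > PySem.Str.len (PySem.Str.replace sequence_alignment "-" "") then
    PySem.Str.len sequence_alignment
  else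
    pvLoopA location sequence_alignment.toList 0

-- ===== PORT B =====
def pvUpperPositions (chars : List Char) : List Int :=
  (PySem.List.enumerate chars 0).filterMap
    (fun p => if 'A' ≤ p.2 ∧ p.2 ≤ 'Z' then some p.1 else none)

def get_amino_acid_in_location_in_alignment_alt (location : Int) (sequence_alignment : String) : Int :=
  if location > PySem.Str.len (PySem.Str.replace sequence_alignment "-" "") then
    PySem.Str.len sequence_alignment
  else if location ≤ 0 then 0
  else
    match PySem.List.pyGet? (pvUpperPositions sequence_alignment.toList) (location - 1) with
    | some i => i + 1
    | none => 0  -- IndexError in Python; excluded by Pre_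

-- ===== PRECONDITION & SPEC =====
-- number of uppercase letters in the string (closed form on the input)
def pvUcount (chars : List Char) : Int :=
  (chars.countP (fun c => decide ('A' ≤ c ∧ c ≤ 'Z')) : Nat)

-- Pre_ excludes exactly the inputs where A raises IndexError (location exceeds the number of
-- uppercase letters yet is not above the dash-free length); B raises IndexError there too.
def Pre_get_amino_acid_in_location_in_alignment (location : Int) (sequence_alignment : String) : Prop :=
  location > PySem.Str.len (PySem.Str.replace sequence_alignment "-" "") ∨
  location ≤ pvUcount sequence_alignment.toList

instance (location : Int) (sequence_alignment : String) : Decidable (Pre_get_amino_acid_in_location_in_alignment location sequence_alignment) := by unfold Pre_get_amino_acid_in_location_in_alignment; infer_instance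

def pvWitness_get_amino_acid_in_location_in_alignment : Int × String := (2, "a-BC-d")

def Spec_get_amino_acid_in_location_in_alignment (location : Int) (sequence_alignment : String) (out : Int) : Prop := out = get_amino_acid_in_location_in_alignment_alt location sequence_alignment
instance (location : Int) (sequence_alignment : String) (out : Int) : Decidable (Spec_get_amino_acid_in_location_in_alignment location sequence_alignment out) := by unfold Spec_get_amino_acid_in_location_in_alignment; infer_instance

-- ===== CLAIM (what is proved, stated in full; the proofs are below) =====
def Claim_equal_get_amino_acid_in_location_in_alignment : Prop := ∀ (location : Int) (sequence_alignment : String), Dom_get_amino_acid_in_location_in_alignment location sequence_alignment → Pre_get_amino_acid_in_location_in_alignment location sequence_alignment → Spec_get_amino_acid_in_location_in_alignment location sequence_alignment (get_amino_acid_in_location_in_alignment location sequence_alignment)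

-- ===== LEMMAS AND PROOFS =====

theorem pvGet_cons {α : Type} (x : α) (xs : List α) (i : Int) (h : 1 ≤ i) :
    PySem.List.pyGet? (x :: xs) i = PySem.List.pyGet? xs (i - 1) := by
  obtain ⟨n, rfl⟩ : ∃ n : Nat, i = (n : Int) + 1 := ⟨(i - 1).toNat, by omega⟩
  simp [PySem.List.pyGet?_cons_succ]

theorem pvLoopA_nonpos (chars : List Char) (loc index : Int) (h : ¬ loc > 0) :
    pvLoopA loc chars index = index := by
  cases chars <;> simp [pvLoopA, h]

-- loop/table correspondence, with the enumerate start generalized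
theorem pvMain (chars : List Char) : ∀ (loc index start : Int), 0 < loc →
    loc ≤ pvUcount chars →
    ∃ p, PySem.List.pyGet?
          ((PySem.List.enumerate chars start).filterMap
            (fun q => if 'A' ≤ q.2 ∧ q.2 ≤ 'Z' then some q.1 else none)) (loc - 1) = some p ∧
      pvLoopA loc chars index = index - start + p + 1 := by
  induction chars with
  | nil =>
    intro loc index start h1 h2
    simp [pvUcount] at h2; omega
  | cons c rest ih =>
    intro loc index start h1 h2
    by_cases hc : 'A' ≤ c ∧ c ≤ 'Z'
    · by_cases hl : loc = 1
      · refine ⟨start, ?_, ?_⟩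
        · simp [PySem.List.enumerate_cons, hc, hl]
        · subst hl
          rw [show pvLoopA 1 (c :: rest) index = pvLoopA 0 rest (index + 1) by
               simp [pvLoopA, hc]]
          rw [pvLoopA_nonpos rest 0 (index + 1) (by omega)]
          ring
      · have h1' : 0 < loc - 1 := by omega
        have h2' : loc - 1 ≤ pvUcount rest := by
          simp [pvUcount, hc] at h2 ⊢; omega
        obtain ⟨p, hp, hl2⟩ := ih (loc - 1) (index + 1) (start + 1) h1' h2'
        refine ⟨p, ?_, ?_⟩
        · rw [PySem.List.enumerate_cons]
          simp only [hc, and_self, if_pos, List.filterMap_cons]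
          rw [pvGet_cons _ _ _ (by omega)]
          exact hp
        · rw [show pvLoopA loc (c :: rest) index = pvLoopA (loc - 1) rest (index + 1) by
               simp [pvLoopA, hc, h1]]
          rw [hl2]; ring
    · have h2' : loc ≤ pvUcount rest := by
        simp [pvUcount, hc] at h2 ⊢; omega
      obtain ⟨p, hp, hl2⟩ := ih loc (index + 1) (start + 1) h1 h2'
      refine ⟨p, ?_, ?_⟩
      · rw [PySem.List.enumerate_cons]
        simp only [hc, List.filterMap_cons, if_false]
        exact hp
      · rw [show pvLoopA loc (c :: rest) index = pvLoopA loc rest (index + 1) by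
             simp [pvLoopA, hc, h1]]
        rw [hl2]; ring

-- ===== VERDICT (by name: the statement is the Claim_ definition above) =====
theorem get_amino_acid_in_location_in_alignment_spec : Claim_equal_get_amino_acid_in_location_in_alignment := by
  intro loc s _hDom hPre
  unfold Spec_get_amino_acid_in_location_in_alignment
  unfold get_amino_acid_in_location_in_alignment get_amino_acid_in_location_in_alignment_alt
  split_ifs with hg hz
  · rfl
  · exact pvLoopA_nonpos s.toList loc 0 (by omega)
  · have hc : loc ≤ pvUcount s.toList := by
      unfold Pre_get_amino_acid_in_location_in_alignment at hPre
      rcases hPre with h | h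
      · exact absurd h hg
      · exact h
    obtain ⟨p, hp, hl⟩ := pvMain s.toList loc 0 0 (by omega) hc
    rw [show pvUpperPositions s.toList =
          (PySem.List.enumerate s.toList 0).filterMap
            (fun q => if 'A' ≤ q.2 ∧ q.2 ≤ 'Z' then some q.1 else none) from rfl]
    rw [hp, hl]; ring
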